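-- pv_equiv track=rewrite | github.com/qeinstein/Leetcode | greedy/earliest-finish-time-for-land-and-water-rides-i_1.py | earliestFinishTime
-- ===== SOURCE A (Python) =====
-- from typing import List
--
-- def earliestFinishTime(landStartTime: List[int], landDuration: List[int], waterStartTime: List[int], waterDuration: List[int]) -> int:
--
--     min_time = float('inf')
--
--     for i in range(len(landDuration)):
--         for j in range(len(waterDuration)):
--             endforland = landDuration[i] + landStartTime[i]
--             waterstraland = max(endforland, waterStartTime[j])
--             total = waterstraland + waterDuration[j]
--
--             endforwater = waterDuration[j] + waterStartTime[j]
--             landstrawater = max(endforwater, landStartTime[i])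
--             total2 = landstrawater + landDuration[i]
--
--             min_time = min(min_time, total, total2)
--
--     return min_time
-- ===== SOURCE B (Python) =====
-- from typing import List
--
-- def earliestFinishTime(landStartTime: List[int], landDuration: List[int], waterStartTime: List[int], waterDuration: List[int]) -> int:
--     # O(n+m): the best partner ride is always the one with the earliest end time,
--     # so precompute the minimal land end and minimal water end, then do two linear scans.
--     min_land_end = min(s + d for s, d in zip(landStartTime, landDuration))
--     min_water_end = min(s + d for s, d in zip(waterStartTime, waterDuration))
--     water_last = min(max(min_land_end, s) + d for s, d in zip(waterStartTime, waterDuration))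
--     land_last = min(max(min_water_end, s) + d for s, d in zip(landStartTime, landDuration))
--     return min(water_last, land_last)
-- ===== Notes on version B (the rewrite author's own statement) =====
-- stated objective: faster
-- what changed: Replaced the O(n*m) double loop over all land/water pairs by precomputing the minimal land end time and minimal water end time and then doing two linear scans (max(.,s)+d is monotone in the first ride's end time, so only the earliest-ending partner matters).
-- outside the precondition, e.g. on earliestFinishTime([], [], [1], [1]): A returns inf, B raises ValueError; on earliestFinishTime([1], [1, 2], [1], [1]): A raises IndexError, B returns 3
import Mathlib
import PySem

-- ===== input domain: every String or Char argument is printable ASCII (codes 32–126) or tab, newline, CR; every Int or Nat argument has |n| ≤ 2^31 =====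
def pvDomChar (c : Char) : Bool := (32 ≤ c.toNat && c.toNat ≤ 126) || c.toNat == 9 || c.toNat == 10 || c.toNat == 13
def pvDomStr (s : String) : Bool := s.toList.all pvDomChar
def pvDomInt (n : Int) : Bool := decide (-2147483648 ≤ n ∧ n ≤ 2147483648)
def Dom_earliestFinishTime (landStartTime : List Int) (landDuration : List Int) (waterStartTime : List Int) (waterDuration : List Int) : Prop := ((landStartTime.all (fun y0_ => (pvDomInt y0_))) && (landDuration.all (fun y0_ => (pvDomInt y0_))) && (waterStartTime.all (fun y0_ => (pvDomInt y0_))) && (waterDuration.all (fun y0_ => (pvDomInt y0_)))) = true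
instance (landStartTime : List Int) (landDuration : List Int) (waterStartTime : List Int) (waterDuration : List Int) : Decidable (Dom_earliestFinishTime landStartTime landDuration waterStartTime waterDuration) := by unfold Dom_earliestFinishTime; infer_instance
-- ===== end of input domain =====

-- B replaces A's O(n*m) pairwise loop by precomputed minimal end times and two linear scans (objective: faster).

-- ===== PORT A =====
-- min_time starts at float('inf'); modelled as Option Int with none = inf (Pre_ excludes the
-- empty cases where the float inf itself would be returned).
def pvMinO (m : Option Int) (x : Int) : Option Int :=
  some (match m with | none => x | some v => min v x)

def earliestFinishTime (landStartTime : List Int) (landDuration : List Int) (waterStartTime : List Int) (waterDuration : List Int) : Int :=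
  ((PySem.List.pyRange 0 (landDuration.length : Int) 1).foldl (fun m i =>
    (PySem.List.pyRange 0 (waterDuration.length : Int) 1).foldl (fun m j =>
      -- pyGetD with default 0: exact inside Pre_ (all indices in range); Python raises IndexError outside
      let endforland := PySem.List.pyGetD landDuration i 0 + PySem.List.pyGetD landStartTime i 0
      let waterstraland := max endforland (PySem.List.pyGetD waterStartTime j 0)
      let total := waterstraland + PySem.List.pyGetD waterDuration j 0
      let endforwater := PySem.List.pyGetD waterDuration j 0 + PySem.List.pyGetD waterStartTime j 0
      let landstrawater := max endforwater (PySem.List.pyGetD landStartTime i 0)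
      let total2 := landstrawater + PySem.List.pyGetD landDuration i 0
      pvMinO (pvMinO m total) total2) m) none).getD 0

-- ===== PORT B =====
-- Python's min() over a nonempty sequence (Source B raises ValueError on an empty one; excluded by Pre_)
def pvMin1 (xs : List Int) : Int :=
  match xs with
  | [] => 0
  | x :: r => r.foldl min x

def earliestFinishTime_alt (landStartTime : List Int) (landDuration : List Int) (waterStartTime : List Int) (waterDuration : List Int) : Int :=
  let minLandEnd := pvMin1 (((landStartTime.zip landDuration)).map (fun p => p.1 + p.2))
  let minWaterEnd := pvMin1 (((waterStartTime.zip waterDuration)).map (fun p => p.1 + p.2))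
  let waterLast := pvMin1 (((waterStartTime.zip waterDuration)).map (fun p => max minLandEnd p.1 + p.2))
  let landLast := pvMin1 (((landStartTime.zip landDuration)).map (fun p => max minWaterEnd p.1 + p.2))
  min waterLast landLast

-- ===== PRECONDITION & SPEC =====
-- Pre_ excludes (i) empty landDuration/waterDuration, where A returns float('inf') — not an int —
-- and B raises ValueError, and (ii) start lists shorter than the duration lists, where A raises IndexError.
def Pre_earliestFinishTime (landStartTime : List Int) (landDuration : List Int) (waterStartTime : List Int) (waterDuration : List Int) : Prop :=
  landDuration ≠ [] ∧ waterDuration ≠ [] ∧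
  landDuration.length ≤ landStartTime.length ∧ waterDuration.length ≤ waterStartTime.length
instance (landStartTime : List Int) (landDuration : List Int) (waterStartTime : List Int) (waterDuration : List Int) : Decidable (Pre_earliestFinishTime landStartTime landDuration waterStartTime waterDuration) := by unfold Pre_earliestFinishTime; infer_instance

def pvWitness_earliestFinishTime : List Int × List Int × List Int × List Int := ([0], [2], [1], [3])

def Spec_earliestFinishTime (landStartTime : List Int) (landDuration : List Int) (waterStartTime : List Int) (waterDuration : List Int) (out : Int) : Prop := out = earliestFinishTime_alt landStartTime landDuration waterStartTime waterDuration
instance (landStartTime : List Int) (landDuration : List Int) (waterStartTime : List Int) (waterDuration : List Int) (out : Int) : Decidable (Spec_earliestFinishTime landStartTime landDuration waterStartTime waterDuration out) := by unfold Spec_earliestFinishTime; infer_instance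

-- ===== CLAIM (what is proved, stated in full; the proofs are below) =====
def Claim_equal_earliestFinishTime : Prop := ∀ (landStartTime : List Int) (landDuration : List Int) (waterStartTime : List Int) (waterDuration : List Int), Dom_earliestFinishTime landStartTime landDuration waterStartTime waterDuration → Pre_earliestFinishTime landStartTime landDuration waterStartTime waterDuration → Spec_earliestFinishTime landStartTime landDuration waterStartTime waterDuration (earliestFinishTime landStartTime landDuration waterStartTime waterDuration)

-- ===== LEMMAS AND PROOFS =====

-- candidate values of A's inner loop body, in (start, duration) pairs
def pvTA (p q : Int × Int) : Int := max (p.2 + p.1) q.1 + q.2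
def pvTB (p q : Int × Int) : Int := max (q.2 + q.1) p.1 + p.2

-- a Python index loop over two parallel lists is a fold over their zip
theorem pv_loop2 {α : Type} (f : α → Int → Int → α) (xs ys : List Int) (h : ys.length ≤ xs.length) (init : α) :
    (PySem.List.pyRange 0 (ys.length : Int) 1).foldl (fun m i => f m (PySem.List.pyGetD xs i 0) (PySem.List.pyGetD ys i 0)) init
    = (xs.zip ys).foldl (fun m p => f m p.1 p.2) init := by
  have hlen : (xs.zip ys).length = ys.length := by
    simp [List.length_zip]; omega
  rw [← PySem.List.foldl_pyRange_zero_pyGetD' (xs.zip ys) (0, 0) (fun m p => f m p.1 p.2) init, hlen]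
  apply PySem.List.foldl_congr_mem
  intro acc i hi
  obtain ⟨h0, h1⟩ := (PySem.List.mem_pyRange_one).1 hi
  have hiy : i.toNat < ys.length := by omega
  have hix : i.toNat < xs.length := by omega
  rw [PySem.List.pyGetD_eq_getElem (h0 := h0) (h1 := by omega),
      PySem.List.pyGetD_eq_getElem (h0 := h0) (h1 := by omega),
      PySem.List.pyGetD_eq_getElem (h0 := h0) (h1 := by simp [List.length_zip]; omega)]
  simp [List.getElem_zip]

theorem pv_inner_flat (W : List (Int × Int)) (p : Int × Int) (m : Option Int) :
    W.foldl (fun m q => pvMinO (pvMinO m (pvTA p q)) (pvTB p q)) m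
    = (W.flatMap (fun q => [pvTA p q, pvTB p q])).foldl pvMinO m := by
  induction W generalizing m with
  | nil => rfl
  | cons q W ih => simp [List.flatMap_cons, ih]

theorem pv_foldl_flat (C : (Int × Int) → List Int) : ∀ (L : List (Int × Int)) (m : Option Int),
    L.foldl (fun m p => (C p).foldl pvMinO m) m = (L.flatMap C).foldl pvMinO m := by
  intro L
  induction L with
  | nil => intro m; rfl
  | cons p L ih => intro m; simp [List.flatMap_cons, List.foldl_append, ih]

theorem pv_minO_some : ∀ (xs : List Int) (a : Int), xs.foldl pvMinO (some a) = some (xs.foldl min a) := by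
  intro xs
  induction xs with
  | nil => intro a; rfl
  | cons x xs ih => intro a; simp [List.foldl_cons, pvMinO, ih]

theorem pv_minO_none (xs : List Int) (h : xs ≠ []) : (xs.foldl pvMinO none).getD 0 = pvMin1 xs := by
  obtain ⟨x, r, rfl⟩ := List.exists_cons_of_ne_nil h
  rw [List.foldl_cons, show pvMinO none x = some x from rfl, pv_minO_some]
  rfl

theorem pv_foldl_min_min (l : List Int) : ∀ (a b : Int), l.foldl min (min a b) = min a (l.foldl min b) := by
  induction l with
  | nil => intro a b; rfl
  | cons c l ih => intro a b; simp only [List.foldl_cons, min_assoc, ih]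

theorem pv_min1_cons (x : Int) (l : List Int) (h : l ≠ []) : pvMin1 (x :: l) = min x (pvMin1 l) := by
  obtain ⟨y, l, rfl⟩ := List.exists_cons_of_ne_nil h
  simp [pvMin1, List.foldl_cons, pv_foldl_min_min]

theorem pv_min1_append (xs ys : List Int) (hx : xs ≠ []) (hy : ys ≠ []) :
    pvMin1 (xs ++ ys) = min (pvMin1 xs) (pvMin1 ys) := by
  obtain ⟨x, xs, rfl⟩ := List.exists_cons_of_ne_nil hx
  obtain ⟨y, ys, rfl⟩ := List.exists_cons_of_ne_nil hy
  simp [pvMin1, List.foldl_append, List.foldl_cons, pv_foldl_min_min]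

theorem pv_flatMap_ne_nil {α β : Type} (C : α → List β) (L : List α) (hL : L ≠ []) (hC : ∀ p ∈ L, C p ≠ []) :
    L.flatMap C ≠ [] := by
  obtain ⟨p, L, rfl⟩ := List.exists_cons_of_ne_nil hL
  simp only [List.flatMap_cons]
  intro h
  exact hC p (by simp) (List.append_eq_nil_iff.1 h).1

theorem pv_min1_flatMap (C : (Int × Int) → List Int) : ∀ (L : List (Int × Int)), L ≠ [] → (∀ p ∈ L, C p ≠ []) →
    pvMin1 (L.flatMap C) = pvMin1 (L.map (fun p => pvMin1 (C p))) := by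
  intro L
  induction L with
  | nil => intro h; exact absurd rfl h
  | cons p L ih =>
    intro _ hC
    by_cases hL : L = []
    · subst hL; simp [pvMin1]
    · have hCp : C p ≠ [] := hC p (by simp)
      have hC' : ∀ q ∈ L, C q ≠ [] := fun q hq => hC q (by simp [hq])
      rw [List.flatMap_cons, pv_min1_append _ _ hCp (pv_flatMap_ne_nil C L hL hC'),
        ih hL hC', List.map_cons, pv_min1_cons _ _ (by simp [hL])]

theorem pv_min1_map_min {α : Type} (f g : α → Int) : ∀ (W : List α), W ≠ [] →
    pvMin1 (W.map (fun q => min (f q) (g q))) = min (pvMin1 (W.map f)) (pvMin1 (W.map g)) := by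
  intro W
  induction W with
  | nil => intro h; exact absurd rfl h
  | cons q W ih =>
    intro _
    by_cases hW : W = []
    · subst hW; simp [pvMin1]
    · have hne : ∀ (h : α → Int), W.map h ≠ [] := fun h => by simp [hW]
      rw [List.map_cons, List.map_cons, List.map_cons, pv_min1_cons _ _ (hne _),
        pv_min1_cons _ _ (hne _), pv_min1_cons _ _ (hne _), ih hW]
      omega

theorem pv_min1_map_max {α : Type} (f : α → Int) (a b : Int) : ∀ (W : List α), W ≠ [] →
    pvMin1 (W.map (fun q => max (f q) a + b)) = max (pvMin1 (W.map f)) a + b := by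
  intro W
  induction W with
  | nil => intro h; exact absurd rfl h
  | cons q W ih =>
    intro _
    by_cases hW : W = []
    · subst hW; simp [pvMin1]
    · have hne : ∀ (h : α → Int), W.map h ≠ [] := fun h => by simp [hW]
      rw [List.map_cons, List.map_cons, pv_min1_cons _ _ (hne _), pv_min1_cons _ _ (hne _), ih hW]
      omega

theorem pv_min1_swap (e : (Int × Int) → Int) (W : List (Int × Int)) (hW : W ≠ []) :
    ∀ (L : List (Int × Int)), L ≠ [] →
    pvMin1 (L.map (fun p => pvMin1 (W.map (fun q => max (e p) q.1 + q.2))))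
    = pvMin1 (W.map (fun q => max (pvMin1 (L.map e)) q.1 + q.2)) := by
  intro L
  induction L with
  | nil => intro h; exact absurd rfl h
  | cons p L ih =>
    intro _
    by_cases hL : L = []
    · subst hL; simp [pvMin1]
    · have hne : ∀ {β : Type} (M : List β) (h : β → Int), M ≠ [] → M.map h ≠ [] := fun M h hM => by simp [hM]
      rw [List.map_cons, pv_min1_cons _ _ (hne L _ hL), ih hL, List.map_cons,
        pv_min1_cons _ _ (hne L _ hL)]
      have : (W.map (fun q => max (min (e p) (pvMin1 (L.map e))) q.1 + q.2))
           = W.map (fun q => min (max (e p) q.1 + q.2) (max (pvMin1 (L.map e)) q.1 + q.2)) := by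
        apply List.map_congr_left; intro q _; omega
      rw [this, pv_min1_map_min _ _ W hW]

-- ===== VERDICT (by name: the statement is the Claim_ definition above) =====
theorem earliestFinishTime_spec : Claim_equal_earliestFinishTime := by
  intro ls ld ws wd _ hpre
  obtain ⟨hld, hwd, h1, h2⟩ := hpre
  have hls : ls ≠ [] := by
    rintro rfl
    simp only [List.length_nil, Nat.le_zero] at h1
    exact hld (List.length_eq_zero_iff.mp h1)
  have hws : ws ≠ [] := by
    rintro rfl
    simp only [List.length_nil, Nat.le_zero] at h2
    exact hwd (List.length_eq_zero_iff.mp h2)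
  have hL : ls.zip ld ≠ [] := by
    simp [List.zip_eq_nil_iff, hls, hld]
  have hW : ws.zip wd ≠ [] := by
    simp [List.zip_eq_nil_iff, hws, hwd]
  show earliestFinishTime ls ld ws wd = earliestFinishTime_alt ls ld ws wd
  unfold earliestFinishTime earliestFinishTime_alt
  -- outer index loop → fold over ls.zip ld
  rw [pv_loop2 (fun m a b =>
      (PySem.List.pyRange 0 (wd.length : Int) 1).foldl (fun m j =>
        pvMinO (pvMinO m (max (b + a) (PySem.List.pyGetD ws j 0) + PySem.List.pyGetD wd j 0))
          (max (PySem.List.pyGetD wd j 0 + PySem.List.pyGetD ws j 0) a + b)) m) ls ld h1]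
  -- inner index loop → fold over ws.zip wd
  have step2 : ∀ (m : Option Int) (p : Int × Int),
      (PySem.List.pyRange 0 (wd.length : Int) 1).foldl (fun m j =>
        pvMinO (pvMinO m (max (p.2 + p.1) (PySem.List.pyGetD ws j 0) + PySem.List.pyGetD wd j 0))
          (max (PySem.List.pyGetD wd j 0 + PySem.List.pyGetD ws j 0) p.1 + p.2)) m
      = (ws.zip wd).foldl (fun m q => pvMinO (pvMinO m (pvTA p q)) (pvTB p q)) m := by
    intro m p
    rw [pv_loop2 (fun m a b => pvMinO (pvMinO m (max (p.2 + p.1) a + b)) (max (b + a) p.1 + p.2)) ws wd h2]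
    rfl
  simp only [step2, pv_inner_flat, pv_foldl_flat]
  rw [pv_minO_none _ (pv_flatMap_ne_nil _ _ hL (fun p _ => pv_flatMap_ne_nil _ _ hW (by simp)))]
  rw [pv_min1_flatMap _ _ hL (fun p _ => pv_flatMap_ne_nil _ _ hW (by simp))]
  have hCp : ∀ p : Int × Int,
      pvMin1 ((ws.zip wd).flatMap (fun q => [pvTA p q, pvTB p q]))
      = min (pvMin1 ((ws.zip wd).map (fun q => pvTA p q))) (pvMin1 ((ws.zip wd).map (fun q => pvTB p q))) := by
    intro p
    rw [pv_min1_flatMap _ _ hW (by simp)]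
    have : ((ws.zip wd).map (fun q => pvMin1 [pvTA p q, pvTB p q]))
         = (ws.zip wd).map (fun q => min (pvTA p q) (pvTB p q)) := by
      apply List.map_congr_left; intro q _; rfl
    rw [this, pv_min1_map_min _ _ _ hW]
  simp only [hCp]
  rw [pv_min1_map_min (fun p => pvMin1 ((ws.zip wd).map (fun q => pvTA p q)))
        (fun p => pvMin1 ((ws.zip wd).map (fun q => pvTB p q))) (ls.zip ld) hL]
  -- first branch: water ride second; pull the min over land rides inside
  have hA1 : pvMin1 ((ls.zip ld).map (fun p => pvMin1 ((ws.zip wd).map (fun q => pvTA p q))))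
      = pvMin1 ((ws.zip wd).map (fun q =>
          max (pvMin1 ((ls.zip ld).map (fun p => p.1 + p.2))) q.1 + q.2)) := by
    rw [show ((ls.zip ld).map (fun p => p.1 + p.2)) = (ls.zip ld).map (fun p => p.2 + p.1) from
      List.map_congr_left (fun p _ => Int.add_comm _ _)]
    exact pv_min1_swap (fun p => p.2 + p.1) _ hW _ hL
  -- second branch: land ride second; collapse the inner min over water rides
  have hA2 : pvMin1 ((ls.zip ld).map (fun p => pvMin1 ((ws.zip wd).map (fun q => pvTB p q))))
      = pvMin1 ((ls.zip ld).map (fun p =>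
          max (pvMin1 ((ws.zip wd).map (fun q => q.1 + q.2))) p.1 + p.2)) := by
    congr 1
    apply List.map_congr_left
    intro p _
    rw [show ((ws.zip wd).map (fun q => q.1 + q.2)) = (ws.zip wd).map (fun q => q.2 + q.1) from
      List.map_congr_left (fun q _ => Int.add_comm _ _)]
    exact pv_min1_map_max (fun q => q.2 + q.1) p.1 p.2 _ hW
  rw [hA1, hA2]
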